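-- pv_equiv track=rewrite | github.com/Javad228/NeuroNote_Presents | backend/services/gcs_upload.py | _normalize_object_path
-- ===== SOURCE A (Python) =====
-- from posixpath import normpath
--
-- def _normalize_object_path(value: str) -> str:
--     candidate = str(value or "").strip().replace("\\", "/").lstrip("/")
--     if not candidate:
--         raise RuntimeError("Upload object path cannot be empty.")
--     normalized = normpath(candidate).replace("\\", "/")
--     parts = [part for part in normalized.split("/") if part not in {"", "."}]
--     if not parts or any(part == ".." for part in parts):
--         raise RuntimeError(f"Invalid upload object path: {value!r}")
--     return "/".join(parts)
-- ===== SOURCE B (Python) =====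
-- def _normalize_object_path(value: str) -> str:
--     candidate = str(value or "").strip().replace("\\", "/").lstrip("/")
--     if not candidate:
--         raise RuntimeError("Upload object path cannot be empty.")
--     stack = []
--     for part in candidate.split("/"):
--         if part in ("", "."):
--             continue
--         if part == "..":
--             if stack and stack[-1] != "..":
--                 stack.pop()
--             else:
--                 stack.append(part)
--         else:
--             stack.append(part)
--     if not stack or any(part == ".." for part in stack):
--         raise RuntimeError(f"Invalid upload object path: {value!r}")
--     return "/".join(stack)
-- ===== Notes on version B (the rewrite author's own statement) =====
-- stated objective: simpler
-- what changed: B drops the posixpath.normpath call and its join/re-split/filter round-trip, resolving empty, current-directory and parent-directory components in one explicit stack pass over the split of the candidate path.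
import Mathlib
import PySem

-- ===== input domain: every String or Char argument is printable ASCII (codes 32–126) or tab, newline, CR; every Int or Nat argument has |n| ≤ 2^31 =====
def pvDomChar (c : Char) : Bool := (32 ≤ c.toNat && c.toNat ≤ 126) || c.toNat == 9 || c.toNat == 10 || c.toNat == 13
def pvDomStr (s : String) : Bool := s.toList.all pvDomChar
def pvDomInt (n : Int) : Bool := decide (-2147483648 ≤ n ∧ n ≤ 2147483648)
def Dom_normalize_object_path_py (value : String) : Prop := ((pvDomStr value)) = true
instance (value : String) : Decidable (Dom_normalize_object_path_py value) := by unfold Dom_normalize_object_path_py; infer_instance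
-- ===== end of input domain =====

-- B replaces A's posixpath.normpath call plus join/re-split/filter round-trip by one
-- explicit stack pass over the split path (objective: simpler, same return value).

-- shared first Python line of A and B:
-- str(value or "").strip().replace("\\", "/").lstrip("/")
-- (lstrip("/") is exactly dropWhile (· == '/'); 'value or ""' is 'value' for a str)
def pvCandidate (value : String) : List Char :=
  (PySem.Chars.replace (PySem.Chars.strip value.toList) ['\\'] ['/']).dropWhile (fun c => c == '/')

-- ===== PORT A =====
-- transliteration of the loop body of posixpath.normpath (CPython, str version)
def pvNormpathStep (initial_slashes : Nat) (new_comps : List (List Char)) (comp : List Char) : List (List Char) :=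
  if comp == [] || comp == ['.'] then new_comps
  else if comp != ['.', '.'] || (initial_slashes == 0 && new_comps.isEmpty)
          || (!new_comps.isEmpty && new_comps.getLast? == some ['.', '.']) then
    new_comps ++ [comp]
  else if !new_comps.isEmpty then new_comps.dropLast
  else new_comps

-- transliteration of posixpath.normpath, exact on the ASCII domain
def pvNormpath (path : List Char) : List Char :=
  if path == [] then ['.']
  else
    let initial_slashes : Nat :=
      if PySem.Chars.startswith path ['/'] then
        if PySem.Chars.startswith path ['/', '/'] && !(PySem.Chars.startswith path ['/', '/', '/']) then 2 else 1
      else 0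
    let new_comps := (PySem.Chars.splitOn path ['/']).foldl (pvNormpathStep initial_slashes) []
    let p := List.replicate initial_slashes '/' ++ PySem.Chars.join ['/'] new_comps
    if p == [] then ['.'] else p

def normalize_object_path_py (value : String) : String :=
  let candidate := pvCandidate value
  if candidate == [] then ""   -- Python raises RuntimeError here; outside Pre_
  else
    let normalized := PySem.Chars.replace (pvNormpath candidate) ['\\'] ['/']
    let parts := (PySem.Chars.splitOn normalized ['/']).filter (fun p => !(p == [] || p == ['.']))
    if parts == [] || parts.any (fun p => p == ['.', '.']) then ""   -- Python raises; outside Pre_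
    else String.mk (PySem.Chars.join ['/'] parts)

-- ===== PORT B =====
-- one step of B's explicit component stack
def pvResolveStep (stack : List (List Char)) (part : List Char) : List (List Char) :=
  if part == [] || part == ['.'] then stack
  else if part == ['.', '.'] then
    if !stack.isEmpty && stack.getLast? != some ['.', '.'] then stack.dropLast
    else stack ++ [part]
  else stack ++ [part]

def normalize_object_path_py_alt (value : String) : String :=
  let candidate := pvCandidate value
  if candidate == [] then ""   -- Python raises RuntimeError here; outside Pre_
  else
    let stack := (PySem.Chars.splitOn candidate ['/']).foldl pvResolveStep []
    if stack == [] || stack.any (fun p => p == ['.', '.']) then ""   -- Python raises; outside Pre_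
    else String.mk (PySem.Chars.join ['/'] stack)

-- ===== PRECONDITION & SPEC =====
-- Pre_ excludes exactly the inputs on which A raises RuntimeError: an empty candidate
-- path, and paths whose parent-directory components escape the root or leave nothing
-- (some prefix has more parent-directory components than ordinary ones, or no
-- component survives resolution).
def Pre_normalize_object_path_py (value : String) : Prop :=
  pvCandidate value ≠ [] ∧
  (let ps := (PySem.Chars.splitOn (pvCandidate value) ['/']).filter (fun p => !(p == [] || p == ['.']))
   (∀ n < ps.length, 2 * (ps.take n).count ['.', '.'] ≤ n) ∧ 2 * ps.count ['.', '.'] < ps.length)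
instance (value : String) : Decidable (Pre_normalize_object_path_py value) := by
  unfold Pre_normalize_object_path_py; infer_instance

def pvWitness_normalize_object_path_py : String := "a/b/../c"

def Spec_normalize_object_path_py (value : String) (out : String) : Prop := out = normalize_object_path_py_alt value
instance (value : String) (out : String) : Decidable (Spec_normalize_object_path_py value out) := by unfold Spec_normalize_object_path_py; infer_instance

-- ===== CLAIM (what is proved, stated in full; the proofs are below) =====
def Claim_equal_normalize_object_path_py : Prop := ∀ (value : String), Dom_normalize_object_path_py value → Pre_normalize_object_path_py value → Spec_normalize_object_path_py value (normalize_object_path_py value)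


-- ===== LEMMAS AND PROOFS =====

-- ---- characterizing PySem.Chars.splitOn on a single-character separator ----
def pvSplitAux (a : Char) : List Char → List Char → List (List Char)
  | [], cur => [cur.reverse]
  | c :: t, cur => if a = c then cur.reverse :: pvSplitAux a t [] else pvSplitAux a t (c :: cur)

theorem pvGo_eq (a : Char) : ∀ (l : List Char) (cur : List Char) (acc : List (List Char)) (fuel : Nat),
    l.length ≤ fuel →
    PySem.Chars.splitOn.go [a] fuel l cur acc = acc.reverse ++ pvSplitAux a l cur := by
  intro l
  induction l with
  | nil =>
    intro cur acc fuel _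
    cases fuel <;> rw [PySem.Chars.splitOn.go] <;> simp [pvSplitAux]
  | cons c t ih =>
    intro cur acc fuel hf
    cases fuel with
    | zero => simp at hf
    | succ f =>
      rw [PySem.Chars.splitOn.go]
      by_cases hac : a = c
      · rw [if_pos (by simp [List.isPrefixOf, hac])]
        have hdrop : List.drop (List.length [a]) (c :: t) = t := by simp
        rw [hdrop, ih [] (cur.reverse :: acc) f (by simpa using hf)]
        rw [pvSplitAux, if_pos hac]
        simp
      · rw [if_neg (by simp [List.isPrefixOf]; intro h; exact hac h)]
        rw [ih (c :: cur) acc f (by simpa using hf)]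
        rw [pvSplitAux, if_neg hac]

theorem pvSplitOn_eq (a : Char) (s : List Char) :
    PySem.Chars.splitOn s [a] = pvSplitAux a s [] := by
  unfold PySem.Chars.splitOn
  rw [pvGo_eq a s [] [] (s.length + 1) (by omega)]
  simp

theorem pvSplitAux_chars (a : Char) : ∀ (l cur x : List Char),
    x ∈ pvSplitAux a l cur → ∀ c ∈ x, c ∈ l ∨ c ∈ cur := by
  intro l
  induction l with
  | nil =>
    intro cur x hx c hc
    simp [pvSplitAux] at hx
    subst hx; right; simpa using hc
  | cons d t ih =>
    intro cur x hx c hc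
    rw [pvSplitAux] at hx
    by_cases had : a = d
    · rw [if_pos had] at hx
      rcases List.mem_cons.mp hx with hx | hx
      · subst hx; right; simpa using hc
      · rcases ih [] x hx c hc with h | h
        · left; exact List.mem_cons_of_mem _ h
        · simp at h
    · rw [if_neg had] at hx
      rcases ih (d :: cur) x hx c hc with h | h
      · left; exact List.mem_cons_of_mem _ h
      · rcases List.mem_cons.mp h with h | h
        · left; simp [h]
        · right; exact h

theorem pvSplitAux_no_sep (a : Char) : ∀ (l cur x : List Char),
    a ∉ cur → x ∈ pvSplitAux a l cur → a ∉ x := by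
  intro l
  induction l with
  | nil =>
    intro cur x hcur hx
    simp [pvSplitAux] at hx
    subst hx; simpa using hcur
  | cons d t ih =>
    intro cur x hcur hx
    rw [pvSplitAux] at hx
    by_cases had : a = d
    · rw [if_pos had] at hx
      rcases List.mem_cons.mp hx with hx | hx
      · subst hx; simpa using hcur
      · exact ih [] x (by simp) hx
    · rw [if_neg had] at hx
      refine ih (d :: cur) x ?_ hx
      intro h
      rcases List.mem_cons.mp h with h | h
      · exact had h
      · exact hcur h

theorem pvSplitAux_append (a : Char) : ∀ (x r cur : List Char), a ∉ x →
    pvSplitAux a (x ++ r) cur = pvSplitAux a r (x.reverse ++ cur) := by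
  intro x
  induction x with
  | nil => intro r cur _; simp
  | cons c t ih =>
    intro r cur hx
    have hac : a ≠ c := fun h => hx (by simp [h])
    simp only [List.cons_append, pvSplitAux, if_neg hac]
    rw [ih r (c :: cur) (fun h => hx (List.mem_cons_of_mem _ h))]
    simp

theorem pvRoundtrip (a : Char) : ∀ (ls : List (List Char)), ls ≠ [] →
    (∀ x ∈ ls, a ∉ x) → pvSplitAux a (PySem.Chars.join [a] ls) [] = ls := by
  intro ls
  induction ls with
  | nil => intro h; exact absurd rfl h
  | cons x ls ih =>
    intro _ hfree
    cases ls with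
    | nil =>
      rw [PySem.Chars.join_singleton]
      have := pvSplitAux_append a x [] [] (hfree x (by simp))
      simpa [pvSplitAux] using this
    | cons y ls' =>
      rw [PySem.Chars.join_cons_cons]
      rw [List.append_assoc, pvSplitAux_append a x _ [] (hfree x (by simp))]
      simp only [List.singleton_append, pvSplitAux, if_pos rfl]
      rw [ih (by simp) (fun z hz => hfree z (List.mem_cons_of_mem _ hz))]
      simp

-- ---- characterizing PySem.Chars.replace on single characters ----
theorem pvReplaceGo_eq (a b : Char) : ∀ (l acc : List Char) (fuel : Nat),
    l.length ≤ fuel →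
    PySem.Chars.replace.go [a] [b] fuel l acc
      = acc.reverse ++ l.map (fun c => if c = a then b else c) := by
  intro l
  induction l with
  | nil =>
    intro acc fuel _
    cases fuel <;> rw [PySem.Chars.replace.go] <;> simp
  | cons c t ih =>
    intro acc fuel hf
    cases fuel with
    | zero => simp at hf
    | succ f =>
      rw [PySem.Chars.replace.go]
      by_cases hac : a = c
      · rw [if_pos (by simp [List.isPrefixOf, hac])]
        have hdrop : List.drop (List.length [a]) (c :: t) = t := by simp
        rw [hdrop, ih ([b].reverse ++ acc) f (by simpa using hf)]
        simp [hac]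
      · rw [if_neg (by simp [List.isPrefixOf]; intro h; exact hac h)]
        rw [ih (c :: acc) f (by simpa using hf)]
        have : c ≠ a := fun h => hac h.symm
        simp [this]

theorem pvReplace_eq (a b : Char) (s : List Char) :
    PySem.Chars.replace s [a] [b] = s.map (fun c => if c = a then b else c) := by
  unfold PySem.Chars.replace
  simp only [List.isEmpty_cons, Bool.false_eq_true, if_neg]
  exact pvReplaceGo_eq a b s [] s.length le_rfl

theorem pvReplace_not_mem (a b : Char) (hab : a ≠ b) (s : List Char) :
    a ∉ PySem.Chars.replace s [a] [b] := by
  rw [pvReplace_eq]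
  intro h
  rcases List.mem_map.mp h with ⟨c, _, hc⟩
  by_cases h' : c = a
  · rw [if_pos h'] at hc; exact hab hc.symm
  · rw [if_neg h'] at hc; exact h' hc

theorem pvReplace_id (a b : Char) (s : List Char) (h : a ∉ s) :
    PySem.Chars.replace s [a] [b] = s := by
  rw [pvReplace_eq]
  conv_rhs => rw [← List.map_id s]
  refine List.map_congr_left (fun c hc => ?_)
  have hca : c ≠ a := fun h' => h (by rw [← h']; exact hc)
  simp [hca]

-- ---- the candidate path starts with no '/' and contains no backslash ----
theorem pvCandidate_no_backslash (value : String) : '\\' ∉ pvCandidate value := by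
  intro h
  exact pvReplace_not_mem '\\' '/' (by decide) _
    ((List.dropWhile_sublist _).mem h)

theorem pvCandidate_no_slash_prefix (value : String) :
    PySem.Chars.startswith (pvCandidate value) ['/'] = false := by
  unfold pvCandidate PySem.Chars.startswith
  generalize PySem.Chars.replace (PySem.Chars.strip value.toList) ['\\'] ['/'] = l
  induction l with
  | nil => simp
  | cons c t ih =>
    by_cases hc : c = '/'
    · simpa [List.dropWhile, hc] using ih
    · have hb : (c == '/') = false := by simpa using hc
      simp only [List.dropWhile, hb]
      simp [List.isPrefixOf]
      first
        | rfl
        | (intro h; exact hc h.symm)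

-- ---- membership / non-emptiness of a '/'-join ----
theorem pvJoin_mem (a c : Char) : ∀ (ls : List (List Char)),
    c ∈ PySem.Chars.join [a] ls → c = a ∨ ∃ x ∈ ls, c ∈ x := by
  intro ls
  induction ls with
  | nil => intro h; rw [PySem.Chars.join_nil] at h; simp at h
  | cons x ls ih =>
    intro h
    cases ls with
    | nil =>
      rw [PySem.Chars.join_singleton] at h
      exact Or.inr ⟨x, by simp, h⟩
    | cons y ls' =>
      rw [PySem.Chars.join_cons_cons] at h
      rcases List.mem_append.mp h with h | h
      · rcases List.mem_append.mp h with h | h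
        · exact Or.inr ⟨x, by simp, h⟩
        · exact Or.inl (by simpa using h)
      · rcases ih h with h | ⟨z, hz, hcz⟩
        · exact Or.inl h
        · exact Or.inr ⟨z, List.mem_cons_of_mem _ hz, hcz⟩

theorem pvJoin_ne_nil (a : Char) : ∀ (ls : List (List Char)), ls ≠ [] → [] ∉ ls →
    PySem.Chars.join [a] ls ≠ [] := by
  intro ls
  induction ls with
  | nil => intro h; exact absurd rfl h
  | cons x ls _ =>
    intro _ hmem
    cases ls with
    | nil =>
      rw [PySem.Chars.join_singleton]
      exact fun h => hmem (by simp [h])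
    | cons y ls' =>
      rw [PySem.Chars.join_cons_cons]
      intro h
      have hlen := congrArg List.length h
      simp at hlen

-- ---- the two loop bodies agree when there is no leading slash ----
theorem pvStep_eq (s : List (List Char)) (c : List Char) :
    pvNormpathStep 0 s c = pvResolveStep s c := by
  unfold pvNormpathStep pvResolveStep
  split_ifs <;> simp_all

theorem pvFoldl_step_eq (l : List (List Char)) (s : List (List Char)) :
    l.foldl (pvNormpathStep 0) s = l.foldl pvResolveStep s := by
  induction l generalizing s with
  | nil => rfl
  | cons c t ih => simp only [List.foldl_cons, pvStep_eq, ih]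

-- ---- skipping '' and '.' components commutes with filtering them away ----
theorem pvFoldl_filter (l : List (List Char)) (s : List (List Char)) :
    l.foldl pvResolveStep s
      = (l.filter (fun p => !(p == [] || p == ['.']))).foldl pvResolveStep s := by
  induction l generalizing s with
  | nil => rfl
  | cons c t ih =>
    rw [List.foldl_cons, List.filter_cons]
    by_cases h : (!(c == [] || c == ['.'])) = true
    · rw [if_pos h, List.foldl_cons, ih]
    · have h' : ¬c = [] → c = ['.'] := by simpa using h
      have hstep : pvResolveStep s c = s := by
        unfold pvResolveStep
        by_cases hce : c = []
        · simp [hce]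
        · simp [h' hce]
      rw [if_neg h, hstep, ih]

-- ---- every element the stack ever holds is a good component ----
def pvGood (x : List Char) : Prop := x ≠ [] ∧ x ≠ ['.'] ∧ '/' ∉ x ∧ '\\' ∉ x

theorem pvGood_dd : pvGood ['.', '.'] := by unfold pvGood; refine ⟨by simp, by simp, by decide, by decide⟩

theorem pvStack_inv : ∀ (l s : List (List Char)),
    (∀ x ∈ s, pvGood x) → (∀ x ∈ l, '/' ∉ x ∧ '\\' ∉ x) →
    ∀ x ∈ l.foldl pvResolveStep s, pvGood x := by
  intro l
  induction l with
  | nil => intro s hs _; simpa using hs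
  | cons c t ih =>
    intro s hs hl
    simp only [List.foldl_cons]
    refine ih (pvResolveStep s c) ?_ (fun x hx => hl x (List.mem_cons_of_mem _ hx))
    intro x hx
    unfold pvResolveStep at hx
    by_cases h0 : (c == [] || c == ['.']) = true
    · simp only [h0, if_pos] at hx; exact hs x hx
    · simp only [h0, Bool.false_eq_true, if_neg] at hx
      have hcgood : pvGood c := by
        have h1 : ¬ c = [] := by intro h; simp [h] at h0
        have h2 : ¬ c = ['.'] := by intro h; simp [h] at h0
        exact ⟨h1, h2, (hl c (by simp)).1, (hl c (by simp)).2⟩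
      by_cases hdd : c = ['.', '.']
      · simp only [hdd, beq_self_eq_true, if_pos] at hx
        by_cases hcond : (!s.isEmpty && s.getLast? != some ['.', '.']) = true
        · rw [if_pos hcond] at hx
          exact hs x ((List.dropLast_sublist s).mem hx)
        · rw [if_neg hcond] at hx
          rcases List.mem_append.mp hx with h | h
          · exact hs x h
          · have : x = ['.', '.'] := by simpa using h
            rw [this]; exact pvGood_dd
      · have : (c == ['.', '.']) = false := by simpa using hdd
        simp only [this, Bool.false_eq_true, if_neg] at hx
        rcases List.mem_append.mp hx with h | h
        · exact hs x h
        · have : x = c := by simpa using h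
          rw [this]; exact hcgood

-- ---- the counting invariant: the '..' prefix condition resolves completely ----
theorem pvStack_count : ∀ (l s : List (List Char)),
    (∀ x ∈ l, x ≠ [] ∧ x ≠ ['.']) → ['.', '.'] ∉ s →
    (∀ n ≤ l.length, 2 * ((l.take n).count ['.', '.']) ≤ s.length + n) →
    ['.', '.'] ∉ l.foldl pvResolveStep s ∧
      (l.foldl pvResolveStep s).length + 2 * l.count ['.', '.'] = s.length + l.length := by
  intro l
  induction l with
  | nil => intro s _ hs _; exact ⟨hs, by simp⟩
  | cons c t ih =>
    intro s hl hs hcnt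
    have hc := hl c (by simp)
    simp only [List.foldl_cons]
    by_cases hdd : c = ['.', '.']
    · -- c is '..': the stack is nonempty with a non-'..' top, so it pops
      have h1 : 2 * (((c :: t).take 1).count ['.', '.']) ≤ s.length + 1 := hcnt 1 (by simp)
      have hslen : 1 ≤ s.length := by
        simp [hdd, List.take, List.count_cons] at h1; omega
      have hsne : s ≠ [] := by intro h; rw [h] at hslen; simp at hslen
      have hlast : s.getLast? ≠ some ['.', '.'] := by
        intro h
        exact hs (by
          rcases List.getLast?_eq_some_iff.mp h with ⟨ys, hys⟩
          rw [hys]; simp)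
      have hstep : pvResolveStep s c = s.dropLast := by
        unfold pvResolveStep
        have h0 : (c == [] || c == ['.']) = false := by
          simp
          exact ⟨hc.1, hc.2⟩
        have hcond : (!s.isEmpty && s.getLast? != some ['.', '.']) = true := by
          simp [List.isEmpty_iff, hsne, hlast]
        simp [h0, hdd, hcond]
      rw [hstep]
      have hdrop : ['.', '.'] ∉ s.dropLast := fun h => hs ((List.dropLast_sublist s).mem h)
      have hdl : s.dropLast.length = s.length - 1 := by simp
      have hcnt' : ∀ n ≤ t.length, 2 * ((t.take n).count ['.', '.']) ≤ s.dropLast.length + n := by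
        intro n hn
        have := hcnt (n + 1) (by simpa using Nat.succ_le_succ hn)
        simp [hdd, List.count_cons, List.take] at this
        omega
      have hres := ih s.dropLast (fun x hx => hl x (List.mem_cons_of_mem _ hx)) hdrop hcnt'
      refine ⟨hres.1, ?_⟩
      have h2 := hres.2
      simp [hdd, List.count_cons] at h2 ⊢
      omega
    · -- c is an ordinary component: it is pushed
      have hstep : pvResolveStep s c = s ++ [c] := by
        unfold pvResolveStep
        split_ifs <;> simp_all
      rw [hstep]
      have hpush : ['.', '.'] ∉ s ++ [c] := by
        intro h
        rcases List.mem_append.mp h with h | h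
        · exact hs h
        · have hx : ['.', '.'] = c := by simpa using h
          exact hdd hx.symm
      have hcnt' : ∀ n ≤ t.length, 2 * ((t.take n).count ['.', '.']) ≤ (s ++ [c]).length + n := by
        intro n hn
        have := hcnt (n + 1) (by simpa using Nat.succ_le_succ hn)
        simp [List.count_cons, hdd, List.take] at this ⊢
        omega
      have hres := ih (s ++ [c]) (fun x hx => hl x (List.mem_cons_of_mem _ hx)) hpush hcnt'
      refine ⟨hres.1, ?_⟩
      have h2 := hres.2
      simp [List.count_cons, hdd] at h2 ⊢
      omega


-- ===== VERDICT (by name: the statement is the Claim_ definition above) =====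
theorem normalize_object_path_py_spec : Claim_equal_normalize_object_path_py := by
  intro value _ hpre
  unfold Spec_normalize_object_path_py
  obtain ⟨hne, hc1, hc2⟩ := hpre
  have hcne : (pvCandidate value == []) = false := by simpa using hne
  -- the stack both programs compute
  have hstps :
      (PySem.Chars.splitOn (pvCandidate value) ['/']).foldl pvResolveStep []
        = ((PySem.Chars.splitOn (pvCandidate value) ['/']).filter
            (fun p => !(p == [] || p == ['.']))).foldl pvResolveStep [] :=
    pvFoldl_filter _ []
  have hpsgood : ∀ x ∈ (PySem.Chars.splitOn (pvCandidate value) ['/']).filter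
      (fun p => !(p == [] || p == ['.'])), x ≠ [] ∧ x ≠ ['.'] := by
    intro x hx
    have := List.of_mem_filter hx
    constructor <;> intro h <;> simp [h] at this
  have hcnt : ∀ n ≤ ((PySem.Chars.splitOn (pvCandidate value) ['/']).filter
      (fun p => !(p == [] || p == ['.']))).length,
      2 * ((((PySem.Chars.splitOn (pvCandidate value) ['/']).filter
        (fun p => !(p == [] || p == ['.']))).take n).count ['.', '.'])
        ≤ ([] : List (List Char)).length + n := by
    intro n hn
    rcases Nat.lt_or_ge n ((PySem.Chars.splitOn (pvCandidate value) ['/']).filter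
      (fun p => !(p == [] || p == ['.']))).length with h | h
    · simpa using hc1 n h
    · have hn' : n = _ := le_antisymm hn h
      subst hn'
      rw [List.take_of_length_le le_rfl]
      simp only [List.length_nil, Nat.zero_add]
      exact Nat.le_of_lt hc2
  have hcount := pvStack_count _ [] hpsgood (by simp) hcnt
  have hnodd : ['.', '.'] ∉ (PySem.Chars.splitOn (pvCandidate value) ['/']).foldl pvResolveStep [] := by
    rw [hstps]; exact hcount.1
  have hstne : (PySem.Chars.splitOn (pvCandidate value) ['/']).foldl pvResolveStep [] ≠ [] := by
    rw [hstps]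
    intro h
    have h2 := hcount.2
    rw [h] at h2
    simp only [List.length_nil, Nat.zero_add] at h2
    omega
  have hstgood : ∀ x ∈ (PySem.Chars.splitOn (pvCandidate value) ['/']).foldl pvResolveStep [],
      pvGood x := by
    apply pvStack_inv _ [] (by simp)
    intro x hx
    rw [pvSplitOn_eq] at hx
    refine ⟨pvSplitAux_no_sep '/' _ [] x (by simp) hx, fun hb => ?_⟩
    rcases pvSplitAux_chars '/' _ [] x hx '\\' hb with h | h
    · exact pvCandidate_no_backslash value h
    · simp at h
  have hstniln : [] ∉ (PySem.Chars.splitOn (pvCandidate value) ['/']).foldl pvResolveStep [] :=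
    fun h => (hstgood [] h).1 rfl
  have hjne : PySem.Chars.join ['/']
      ((PySem.Chars.splitOn (pvCandidate value) ['/']).foldl pvResolveStep []) ≠ [] :=
    pvJoin_ne_nil '/' _ hstne hstniln
  -- normpath of the candidate is exactly the joined stack
  have hnp : pvNormpath (pvCandidate value)
      = PySem.Chars.join ['/'] ((PySem.Chars.splitOn (pvCandidate value) ['/']).foldl pvResolveStep []) := by
    unfold pvNormpath
    rw [if_neg (by simp [hcne])]
    simp only [pvCandidate_no_slash_prefix value, Bool.false_eq_true, if_false,
      List.replicate_zero, List.nil_append]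
    rw [pvFoldl_step_eq]
    rw [if_neg (by simpa using hjne)]
  -- re-replacing backslashes is the identity
  have hrep : PySem.Chars.replace (PySem.Chars.join ['/']
      ((PySem.Chars.splitOn (pvCandidate value) ['/']).foldl pvResolveStep [])) ['\\'] ['/']
      = PySem.Chars.join ['/'] ((PySem.Chars.splitOn (pvCandidate value) ['/']).foldl pvResolveStep []) := by
    apply pvReplace_id
    intro h
    rcases pvJoin_mem '/' '\\' _ h with h | ⟨x, hx, hbx⟩
    · exact absurd h (by decide)
    · exact (hstgood x hx).2.2.2 hbx
  -- splitting the joined stack gives the stack back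
  have hsplit : PySem.Chars.splitOn (PySem.Chars.join ['/']
      ((PySem.Chars.splitOn (pvCandidate value) ['/']).foldl pvResolveStep [])) ['/']
      = (PySem.Chars.splitOn (pvCandidate value) ['/']).foldl pvResolveStep [] := by
    rw [pvSplitOn_eq]
    exact pvRoundtrip '/' _ hstne (fun x hx => (hstgood x hx).2.2.1)
  have hfilter : ((PySem.Chars.splitOn (pvCandidate value) ['/']).foldl pvResolveStep []).filter
      (fun p => !(p == [] || p == ['.']))
      = (PySem.Chars.splitOn (pvCandidate value) ['/']).foldl pvResolveStep [] := by
    rw [List.filter_eq_self]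
    intro x hx
    have := hstgood x hx
    simp [this.1, this.2.1]
  have hguard : (((PySem.Chars.splitOn (pvCandidate value) ['/']).foldl pvResolveStep []) == []
      || ((PySem.Chars.splitOn (pvCandidate value) ['/']).foldl pvResolveStep []).any
          (fun p => p == ['.', '.'])) = false := by
    simp only [Bool.or_eq_false_iff]
    refine ⟨by simpa using hstne, ?_⟩
    rw [List.any_eq_false]
    intro x hx
    by_contra hcon
    have hx' : x = ['.', '.'] := by simpa using hcon
    exact hnodd (hx' ▸ hx)
  unfold normalize_object_path_py normalize_object_path_py_alt
  simp only [hcne, Bool.false_eq_true, if_false]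
  rw [hnp, hrep, hsplit, hfilter, hguard]
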